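-- pv_equiv track=rewrite | github.com/memo-ozdincer/CS180-gamification | gamify.py | calculate_hedons_running
-- ===== SOURCE A (Python) =====
-- def calculate_hedons_running(duration, is_tired, star_used):
--     """
--     Calculates the hedons gained or lost from running.
--
--     Args:
--         duration (int): Duration of running in minutes.
--         is_tired (bool): Whether the user is tired.
--         star_used (bool): Whether a star was used.
--
--     Returns:
--         int: Total hedons gained or lost.
--     """
--     hedons = 0
--     for minute in range(1, duration + 1):
--         hedon_per_minute = -2 if is_tired else (2 if minute <= 10 else -2)
--         if star_used and minute <= 10:
--             hedon_per_minute += 3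
--         hedons += hedon_per_minute
--
--     return hedons
-- ===== SOURCE B (Python) =====
-- def calculate_hedons_running(duration, is_tired, star_used):
--     d = max(duration, 0)
--     early = min(d, 10)
--     base = -2 * d if is_tired else 2 * early - 2 * (d - early)
--     return base + (3 * early if star_used else 0)
-- ===== Notes on version B (the rewrite author's own statement) =====
-- stated objective: faster
-- what changed: Replaced the per-minute loop with a closed-form arithmetic formula using min(duration,10) clamped at 0.
import Mathlib
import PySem

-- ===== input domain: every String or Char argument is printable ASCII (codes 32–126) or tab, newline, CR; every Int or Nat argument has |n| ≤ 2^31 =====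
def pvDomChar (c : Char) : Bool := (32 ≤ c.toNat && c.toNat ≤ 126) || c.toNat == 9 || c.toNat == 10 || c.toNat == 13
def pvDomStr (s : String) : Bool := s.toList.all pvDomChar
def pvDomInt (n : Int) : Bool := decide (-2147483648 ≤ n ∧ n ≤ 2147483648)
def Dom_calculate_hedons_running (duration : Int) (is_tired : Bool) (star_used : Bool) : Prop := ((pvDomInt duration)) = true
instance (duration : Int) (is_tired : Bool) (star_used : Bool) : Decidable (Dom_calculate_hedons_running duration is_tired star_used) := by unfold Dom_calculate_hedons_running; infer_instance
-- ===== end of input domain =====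

-- B replaces A's per-minute loop by a closed-form formula (O(1) instead of O(duration)).

-- ===== PORT A =====
def calculate_hedons_running (duration : Int) (is_tired : Bool) (star_used : Bool) : Int :=
  (PySem.List.pyRange 1 (duration + 1) 1).foldl
    (fun hedons minute =>
      let hedon_per_minute : Int := if is_tired then -2 else (if minute ≤ 10 then 2 else -2)
      let hedon_per_minute := if star_used && decide (minute ≤ 10) then hedon_per_minute + 3 else hedon_per_minute
      hedons + hedon_per_minute) 0

-- ===== PORT B =====
def calculate_hedons_running_alt (duration : Int) (is_tired : Bool) (star_used : Bool) : Int :=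
  let d := max duration 0
  let early := min d 10
  let base := if is_tired then -2 * d else 2 * early - 2 * (d - early)
  base + (if star_used then 3 * early else 0)

-- ===== PRECONDITION & SPEC =====
def Spec_calculate_hedons_running (duration : Int) (is_tired : Bool) (star_used : Bool) (out : Int) : Prop := out = calculate_hedons_running_alt duration is_tired star_used
instance (duration : Int) (is_tired : Bool) (star_used : Bool) (out : Int) : Decidable (Spec_calculate_hedons_running duration is_tired star_used out) := by unfold Spec_calculate_hedons_running; infer_instance

-- ===== CLAIM (what is proved, stated in full; the proofs are below) =====
def Claim_equal_calculate_hedons_running : Prop := ∀ (duration : Int) (is_tired : Bool) (star_used : Bool), Dom_calculate_hedons_running duration is_tired star_used → Spec_calculate_hedons_running duration is_tired star_used (calculate_hedons_running duration is_tired star_used)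

-- ===== LEMMAS AND PROOFS =====

theorem chr_nonpos (duration : Int) (is_tired star_used : Bool) (h : duration ≤ 0) :
    calculate_hedons_running duration is_tired star_used = 0 := by
  unfold calculate_hedons_running
  rw [PySem.List.pyRange_one_eq_nil (by omega)]
  rfl

theorem chr_nat (is_tired star_used : Bool) : ∀ n : Nat,
    calculate_hedons_running (n : Int) is_tired star_used
      = calculate_hedons_running_alt (n : Int) is_tired star_used := by
  intro n
  induction n with
  | zero =>
      rw [chr_nonpos _ _ _ (by omega)]
      unfold calculate_hedons_running_alt
      simp
  | succ k ih =>
      have hc : ((k + 1 : Nat) : Int) = (k : Int) + 1 := by push_cast; ring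
      rw [hc]
      have hsplit : PySem.List.pyRange 1 ((k : Int) + 1 + 1) 1
          = PySem.List.pyRange 1 ((k : Int) + 1) 1 ++ [((k : Int) + 1)] :=
        PySem.List.pyRange_one_succ_right (by omega)
      unfold calculate_hedons_running at ih ⊢
      rw [hsplit, List.foldl_append]
      rw [show (PySem.List.pyRange 1 ((k : Int) + 1) 1).foldl _ 0
            = calculate_hedons_running_alt (k : Int) is_tired star_used from ih]
      unfold calculate_hedons_running_alt
      simp only [List.foldl, min_def, max_def]
      cases is_tired <;> cases star_used <;>
        simp only [Bool.true_and, Bool.false_and, decide_eq_true_eq, Bool.false_eq_true,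
          if_true, if_false] <;>
        split_ifs <;> omega

-- ===== VERDICT (by name: the statement is the Claim_ definition above) =====
theorem calculate_hedons_running_spec : Claim_equal_calculate_hedons_running := by
  intro duration is_tired star_used _
  unfold Spec_calculate_hedons_running
  rcases le_or_gt duration 0 with h | h
  · rw [chr_nonpos _ _ _ h]
    unfold calculate_hedons_running_alt
    dsimp only
    split_ifs <;> omega
  · obtain ⟨n, rfl⟩ : ∃ n : Nat, duration = (n : Int) :=
      ⟨duration.toNat, (Int.toNat_of_nonneg (by omega)).symm⟩
    exact chr_nat is_tired star_used n
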